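-- pv_equiv track=rewrite | github.com/frantzmiccoli/artemisia | src/artemisia.py | _get_parent_columns
-- ===== SOURCE A (Python) =====
-- def _get_parent_columns(columns):
--     """
--     Get parent columns from a list of columns. A column is a parent one
--     if it's not contained in any other one. Among 'cluster_zone_4', 'zone'
--     and 'temperature', the parent columns are 'zone' and 'temperature',
--     implicitly we assume that 'cluster_zone_4' need 'zone' to be computed.
--     """
--     parent_columns = []
--     for column in columns:
--         found_parent = False
--         for parent_candidate_column in columns:
--             if column == parent_candidate_column:
--                 continue
--             if parent_candidate_column in column:
--                 found_parent = True
--                 break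
--         if not found_parent:
--             parent_columns.append(column)
--     return parent_columns
-- ===== SOURCE B (Python) =====
-- def _get_parent_columns(columns):
--     """Same result as A, but instead of scanning all other columns per column,
--     hash the column set once and enumerate each column's proper substrings."""
--     present = set(columns)
--     parent_columns = []
--     for column in columns:
--         n = len(column)
--         has_parent = any(
--             column[i:i + m] in present
--             for m in range(n)
--             for i in range(n - m + 1)
--         )
--         if not has_parent:
--             parent_columns.append(column)
--     return parent_columns
-- ===== Notes on version B (the rewrite author's own statement) =====
-- stated objective: faster
-- what changed: Instead of testing every other column for containment in each column (pairwise O(n^2) scan), B builds a hash set of the columns once and, for each column, enumerates its proper substrings and checks them against the set, so the per-column cost no longer depends on the number of columns.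
import Mathlib
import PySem

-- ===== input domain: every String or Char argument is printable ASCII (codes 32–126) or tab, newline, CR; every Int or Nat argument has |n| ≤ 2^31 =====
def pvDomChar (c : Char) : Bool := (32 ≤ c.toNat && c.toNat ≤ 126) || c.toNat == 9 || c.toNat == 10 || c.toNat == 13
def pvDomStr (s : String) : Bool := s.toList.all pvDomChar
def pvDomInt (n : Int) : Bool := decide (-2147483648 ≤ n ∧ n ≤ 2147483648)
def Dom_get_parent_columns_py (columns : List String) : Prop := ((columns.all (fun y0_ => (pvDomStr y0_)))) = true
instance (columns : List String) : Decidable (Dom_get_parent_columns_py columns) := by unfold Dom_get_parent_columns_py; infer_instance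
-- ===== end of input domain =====

-- B replaces A's pairwise containment scan by a hash set of the columns plus
-- enumeration of each column's proper substrings (alternative algorithm, same result).


-- ===== PORT A =====
-- inner 'for parent_candidate_column in columns: continue/break' loop = short-circuit any
def get_parent_columns_py (columns : List String) : List String :=
  columns.foldl (fun parent_columns column =>
    let found_parent :=
      columns.any (fun parent_candidate_column =>
        !(column == parent_candidate_column) && PySem.Str.isIn parent_candidate_column column)
    if !found_parent then parent_columns ++ [column] else parent_columns) []

-- ===== PORT B =====
-- 'any(column[i:i+m] in present for m in range(n) for i in range(n-m+1))'
def pvHasParent (present : PySem.Set String) (column : String) : Bool :=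
  let n : Int := PySem.Str.len column
  (PySem.List.pyRange 0 n 1).any (fun m =>
    (PySem.List.pyRange 0 (n - m + 1) 1).any (fun i =>
      PySem.Set.contains present (PySem.Str.slice column (some i) (some (i + m)))))

def get_parent_columns_py_alt (columns : List String) : List String :=
  let present := PySem.Set.ofList columns
  columns.foldl (fun parent_columns column =>
    if !pvHasParent present column then parent_columns ++ [column] else parent_columns) []

-- ===== PRECONDITION & SPEC =====
def Spec_get_parent_columns_py (columns : List String) (out : List String) : Prop := out = get_parent_columns_py_alt columns
instance (columns : List String) (out : List String) : Decidable (Spec_get_parent_columns_py columns out) := by unfold Spec_get_parent_columns_py; infer_instance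

-- ===== CLAIM (what is proved, stated in full; the proofs are below) =====
def Claim_equal_get_parent_columns_py : Prop := ∀ (columns : List String), Dom_get_parent_columns_py columns → Spec_get_parent_columns_py columns (get_parent_columns_py columns)

-- ===== LEMMAS AND PROOFS =====

-- a proper substring occurrence of some column inside c ↔ some drop/take slice of c is a column
theorem pv_exists_proper_infix_iff (cols : List String) (c : String) :
    (∃ p ∈ cols, p ≠ c ∧ p.toList <:+: c.toList) ↔
    (∃ m i : ℕ, m < c.toList.length ∧ i + m ≤ c.toList.length ∧
       ∃ p ∈ cols, p.toList = (c.toList.drop i).take m) := by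
  constructor
  · rintro ⟨p, hp, hne, s, t, h⟩
    refine ⟨p.toList.length, s.length, ?_, ?_, p, hp, ?_⟩
    · have hlen : s.length + (p.toList.length + t.length) = c.toList.length := by
        have := congrArg List.length h
        simp only [List.length_append] at this
        omega
      rcases Nat.lt_or_ge (p.toList.length) c.toList.length with hlt | hge
      · exact hlt
      · exfalso
        have hs : s = [] := by
          have := List.length_eq_zero_iff.mp (by omega : s.length = 0); exact this
        have ht : t = [] := by
          have := List.length_eq_zero_iff.mp (by omega : t.length = 0); exact this
        apply hne
        apply String.toList_inj.mp
        simpa [hs, ht] using h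
    · have := congrArg List.length h
      simp only [List.length_append] at this
      omega
    · have hdrop : c.toList.drop s.length = p.toList ++ t := by
        rw [← h, List.append_assoc, List.drop_left]
      rw [hdrop, List.take_left]
  · rintro ⟨m, i, hm, him, p, hp, hpl⟩
    refine ⟨p, hp, ?_, ?_⟩
    · intro hpc
      have : p.toList.length < c.toList.length := by
        rw [hpl]
        have h1 : ((c.toList.drop i).take m).length ≤ m := by
          simp [List.length_take]
        omega
      rw [hpc] at this; omega
    · rw [hpl]
      exact ((List.take_prefix _ _).isInfix).trans ((List.drop_suffix _ _).isInfix)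

-- A's inner scan = B's substring enumeration, as Bools
theorem pv_check_eq (cols : List String) (c : String) :
    cols.any (fun p => !(c == p) && PySem.Str.isIn p c)
      = pvHasParent (PySem.Set.ofList cols) c := by
  have hA : (cols.any (fun p => !(c == p) && PySem.Str.isIn p c) = true)
      ↔ (∃ p ∈ cols, p ≠ c ∧ p.toList <:+: c.toList) := by
    simp only [List.any_eq_true, Bool.and_eq_true, Bool.not_eq_true', beq_eq_false_iff_ne,
      PySem.Str.isIn_iff_infix]
    constructor
    · rintro ⟨p, hp, hne, hin⟩; exact ⟨p, hp, fun h => hne h.symm, hin⟩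
    · rintro ⟨p, hp, hne, hin⟩; exact ⟨p, hp, fun h => hne h.symm, hin⟩
  have hB : (pvHasParent (PySem.Set.ofList cols) c = true)
      ↔ (∃ m i : ℕ, m < c.toList.length ∧ i + m ≤ c.toList.length ∧
          ∃ p ∈ cols, p.toList = (c.toList.drop i).take m) := by
    simp only [pvHasParent, List.any_eq_true, PySem.List.mem_pyRange_one, PySem.Str.len_eq]
    constructor
    · rintro ⟨m, ⟨hm0, hmn⟩, i, ⟨hi0, hin⟩, hc⟩
      lift m to ℕ using hm0 with mn
      lift i to ℕ using hi0 with iN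
      refine ⟨mn, iN, by exact_mod_cast hmn, by omega,
        PySem.Str.slice c (some (iN : Int)) (some ((iN : Int) + (mn : Int))), ?_, ?_⟩
      · rw [← PySem.Set.mem_ofList (α := String) cols, ← PySem.Set.contains_iff]; exact hc
      · show (PySem.Str.slice c (some (iN : Int)) (some ((iN : Int) + (mn : Int)))).toList = _
        have hbr : (PySem.Str.slice c (some (iN : Int)) (some ((iN : Int) + (mn : Int)))).toList
            = PySem.List.slice c.toList (some (iN : Int)) (some ((iN : Int) + (mn : Int))) := by
          simp [PySem.Str.slice]
        rw [hbr, PySem.List.slice_natCast_add]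
    · rintro ⟨m, i, hm, him, p, hp, hpl⟩
      refine ⟨(m : Int), ⟨by omega, by omega⟩, (i : Int), ⟨by omega, by omega⟩, ?_⟩
      have : PySem.Str.slice c (some (i : Int)) (some ((i : Int) + (m : Int))) = p := by
        apply String.toList_inj.mp
        show _ = p.toList
        rw [hpl]
        have hbr : (PySem.Str.slice c (some (i : Int)) (some ((i : Int) + (m : Int)))).toList
            = PySem.List.slice c.toList (some (i : Int)) (some ((i : Int) + (m : Int))) := by
          simp [PySem.Str.slice]
        rw [hbr, PySem.List.slice_natCast_add]
      rw [this, PySem.Set.contains_iff, PySem.Set.mem_ofList]; exact hp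
  rcases hbool : cols.any (fun p => !(c == p) && PySem.Str.isIn p c) with _ | _
  · symm
    rw [Bool.eq_false_iff]
    intro hB'
    have := hA.mpr (pv_exists_proper_infix_iff cols c |>.mpr (hB.mp hB'))
    rw [hbool] at this; exact Bool.false_ne_true this
  · symm
    exact hB.mpr (pv_exists_proper_infix_iff cols c |>.mp (hA.mp hbool))

-- ===== VERDICT (by name: the statement is the Claim_ definition above) =====
theorem get_parent_columns_py_spec : Claim_equal_get_parent_columns_py := by
  intro columns _
  unfold Spec_get_parent_columns_py get_parent_columns_py get_parent_columns_py_alt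
  simp only []
  congr 1
  funext acc column
  rw [pv_check_eq columns column]
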